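-- pv_equiv track=rewrite | github.com/shemkem55/vibe | vibe_agent/learning_module.py | predict_next_topic
-- ===== SOURCE A (Python) =====
-- from collections import Counter, defaultdict
--
-- def predict_next_topic(current_topic, history):
--     """Predict what the user might ask about next"""
--     # Build transition probabilities
--     transitions = defaultdict(Counter)
--
--     for i in range(len(history) - 1):
--         current = history[i].get("intent", "unknown")
--         next_topic = history[i + 1].get("intent", "unknown")
--         transitions[current][next_topic] += 1
--
--     if current_topic in transitions:
--         predictions = transitions[current_topic].most_common(3)
--         return [topic for topic, _ in predictions]
--
--     return []
-- ===== SOURCE B (Python) =====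
-- def predict_next_topic(current_topic, history):
--     """Predict what the user might ask about next"""
--     succ = [nxt.get("intent", "unknown")
--             for prev, nxt in zip(history, history[1:])
--             if prev.get("intent", "unknown") == current_topic]
--     remaining = list(dict.fromkeys(succ))
--     result = []
--     for _ in range(3):
--         if not remaining:
--             break
--         best = max(remaining, key=succ.count)
--         result.append(best)
--         remaining.remove(best)
--     return result
-- ===== Notes on version B (the rewrite author's own statement) =====
-- stated objective: alternative
-- what changed: B replaces A's transition table plus sort-based most_common(3) by selection without any counting structure or sort: it filters the successors of current_topic, dedups them, and three times extracts the most frequent remaining key with max(remaining, key=succ.count), removing it each round.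
import Mathlib
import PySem

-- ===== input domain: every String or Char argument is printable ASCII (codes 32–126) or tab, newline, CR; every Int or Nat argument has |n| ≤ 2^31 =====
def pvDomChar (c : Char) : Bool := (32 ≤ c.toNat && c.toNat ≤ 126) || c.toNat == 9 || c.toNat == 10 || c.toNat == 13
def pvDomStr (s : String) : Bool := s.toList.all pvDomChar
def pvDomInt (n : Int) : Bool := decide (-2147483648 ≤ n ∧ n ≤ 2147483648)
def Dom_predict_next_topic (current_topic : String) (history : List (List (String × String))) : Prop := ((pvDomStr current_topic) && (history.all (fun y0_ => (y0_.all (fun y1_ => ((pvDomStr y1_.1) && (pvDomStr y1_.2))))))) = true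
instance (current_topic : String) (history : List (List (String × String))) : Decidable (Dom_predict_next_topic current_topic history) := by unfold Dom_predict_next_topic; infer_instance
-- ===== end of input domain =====

-- B replaces A's transition table and sort-based most_common(3) by three rounds of
-- first-max selection over the deduped successors of current_topic (alternative algorithm, same result).


-- ===== PORT A =====
-- d.get("intent", "unknown") on a Python dict (used by both Pythons)
def pvIntent (d : List (String × String)) : String :=
  (PySem.Dict.mk d).getD "intent" "unknown"

-- Counter.most_common(3) then [topic for topic, _ in …]: stable descending sort by count, first 3 keys
def pvTop3 (c : PySem.Dict String Int) : List String :=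
  ((PySem.List.sorted c.items (fun kv => kv.2) true).take 3).map (·.1)

def predict_next_topic (current_topic : String) (history : List (List (String × String))) : List String :=
  let transitions : PySem.Dict String (PySem.Dict String Int) :=
    (PySem.List.pyRange 0 ((history.length : Int) - 1) 1).foldl
      (fun tr i =>
        let current := pvIntent (PySem.List.pyGetD history i [])
        let next_topic := pvIntent (PySem.List.pyGetD history (i + 1) [])
        tr.modify current PySem.Dict.empty (fun c => c.modify next_topic 0 (· + 1)))
      PySem.Dict.empty
  if transitions.contains current_topic then
    pvTop3 (transitions.getD current_topic PySem.Dict.empty)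
  else []

-- ===== PORT B =====
-- the 'for _ in range(3): if not remaining: break; best = max(remaining, key=succ.count); …' loop;
-- Python's max with a key returns the FIRST maximum (PySem.List.max?), 'if not remaining: break'
-- is the none branch, and remaining.remove(best) is List.erase (exact: best ∈ remaining by max?_mem,
-- and remove? removes the first occurrence exactly as erase does)
def pvSelect : Nat → List String → List String → List String
  | 0, _, _ => []
  | n + 1, succ, remaining =>
    match PySem.List.max? remaining (fun k => ((succ.count k : Nat) : Int)) with
    | none => []
    | some best => best :: pvSelect n succ (remaining.erase best)

def predict_next_topic_alt (current_topic : String) (history : List (List (String × String))) : List String :=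
  let succ : List String :=
    ((history.zip history.tail).filter (fun p => pvIntent p.1 == current_topic)).map
      (fun p => pvIntent p.2)
  pvSelect 3 succ (PySem.List.dedup succ)

-- ===== PRECONDITION & SPEC =====
def Spec_predict_next_topic (current_topic : String) (history : List (List (String × String))) (out : List String) : Prop := out = predict_next_topic_alt current_topic history
instance (current_topic : String) (history : List (List (String × String))) (out : List String) : Decidable (Spec_predict_next_topic current_topic history out) := by unfold Spec_predict_next_topic; infer_instance

-- ===== CLAIM (what is proved, stated in full; the proofs are below) =====
def Claim_equal_predict_next_topic : Prop := ∀ (current_topic : String) (history : List (List (String × String))), Dom_predict_next_topic current_topic history → Spec_predict_next_topic current_topic history (predict_next_topic current_topic history)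

-- ===== LEMMAS AND PROOFS =====

-- Nat-range core of the next lemma: an index loop reading xs[k] and xs[k+1] is a fold over consecutive pairs
theorem foldl_rangeN_pairs {α β : Type} (d : α) (g : β → α → α → β) :
    ∀ (xs : List α) (init : β),
      (List.range (xs.length - 1)).foldl
          (fun acc k => g acc (xs.getD k d) (xs.getD (k + 1) d)) init
        = (xs.zip xs.tail).foldl (fun acc p => g acc p.1 p.2) init := by
  intro xs
  induction xs with
  | nil => intro init; simp
  | cons x t ih =>
    intro init
    cases t with
    | nil => simp
    | cons y u =>
      have h1 : (x :: y :: u).length - 1 = u.length + 1 := by simp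
      rw [h1, List.range_succ_eq_map, List.foldl_cons, List.foldl_map]
      have h2 : (y :: u).length - 1 = u.length := by simp
      have := ih (g init x y)
      rw [h2] at this
      simpa [List.getD_cons_succ, Nat.succ_eq_add_one] using this

-- A's index loop over range(len(history) - 1) is a fold over consecutive pairs
theorem foldl_range_pairs {α β : Type} (d : α) (g : β → α → α → β)
    (xs : List α) (init : β) :
    (PySem.List.pyRange 0 ((xs.length : Int) - 1) 1).foldl
        (fun acc i => g acc (PySem.List.pyGetD xs i d) (PySem.List.pyGetD xs (i + 1) d)) init
      = (xs.zip xs.tail).foldl (fun acc p => g acc p.1 p.2) init := by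
  rw [PySem.List.pyRange_one, List.foldl_map]
  have htn : ((((xs.length : Int) - 1) - 0).toNat) = xs.length - 1 := by omega
  rw [htn]
  simp only [zero_add]
  have hfun : (fun (acc : β) (k : Nat) =>
      g acc (PySem.List.pyGetD xs (k : Int) d)
        (PySem.List.pyGetD xs ((k : Int) + 1) d))
      = fun acc k => g acc (xs.getD k d) (xs.getD (k + 1) d) := by
    funext acc k
    have h2 : ((k : Int) + 1) = (((k + 1 : Nat)) : Int) := by push_cast; ring
    rw [h2, PySem.List.pyGetD_natCast, PySem.List.pyGetD_natCast]
  rw [hfun, foldl_rangeN_pairs]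

-- looking up one key in A's nested transition fold yields a single-counter fold over the pairs
theorem getD_nested_fold (ct : String) :
    ∀ (l : List ((List (String × String)) × (List (String × String))))
      (tr : PySem.Dict String (PySem.Dict String Int)),
      (l.foldl
          (fun tr p =>
            tr.modify (pvIntent p.1) PySem.Dict.empty
              (fun c => c.modify (pvIntent p.2) 0 (· + 1))) tr).getD ct PySem.Dict.empty
        = l.foldl
            (fun c p =>
              if pvIntent p.1 == ct then c.modify (pvIntent p.2) 0 (· + 1) else c)
            (tr.getD ct PySem.Dict.empty) := by
  intro l
  induction l with
  | nil => intro tr; rfl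
  | cons p t ih =>
    intro tr
    rw [List.foldl_cons, List.foldl_cons, ih]
    by_cases h : pvIntent p.1 = ct
    · subst h
      rw [PySem.Dict.getD_modify_self]
      simp
    · rw [PySem.Dict.getD_modify_of_ne _ _ _ (Ne.symm h)]
      have : (pvIntent p.1 == ct) = false := by simp [h]
      rw [this]
      simp

-- stable sort commutes with mapping a decoration in (key reads through the decoration)
theorem insertBy_map {α β κ : Type} [LT κ] [DecidableLT κ]
    (f : α → β) (key : β → κ) (x : α) :
    ∀ (l : List α),
      PySem.List.insertBy (fun a b => decide (key b < key a)) (f x) (l.map f)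
        = (PySem.List.insertBy (fun a b => decide (key (f b) < key (f a))) x l).map f := by
  intro l
  induction l with
  | nil => simp [PySem.List.insertBy]
  | cons y t ih =>
    simp only [List.map_cons, PySem.List.insertBy]
    by_cases h : key (f y) < key (f x) <;> simp [h, ih]

theorem sorted_map_comm {α β κ : Type} [LT κ] [DecidableLT κ]
    (f : α → β) (key : β → κ) (ks : List α) :
    PySem.List.sorted (ks.map f) key true
      = (PySem.List.sorted ks (fun a => key (f a)) true).map f := by
  rw [PySem.List.sorted_rev_eq_foldl_insertBy, PySem.List.sorted_rev_eq_foldl_insertBy]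
  suffices h : ∀ (l : List α) (acc : List α),
      (l.map f).foldl (fun acc x => PySem.List.insertBy (fun a b => decide (key b < key a)) x acc)
        (acc.map f)
      = (l.foldl (fun acc x =>
          PySem.List.insertBy (fun a b => decide (key (f b) < key (f a))) x acc) acc).map f by
    simpa using h ks []
  intro l
  induction l with
  | nil => intro acc; simp
  | cons x t ih =>
    intro acc
    simp only [List.map_cons, List.foldl_cons, insertBy_map f key x acc]
    exact ih _

-- running max over a list (Python's max(xs, key=…) after seeing a)
def pvMaxF {α : Type} (c : α → Int) (a : α) (t : List α) : α :=
  t.foldl (fun m y => if c m < c y then y else m) a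

theorem max?_cons_eq_maxF {α : Type} (c : α → Int) (x : α) (t : List α) :
    PySem.List.max? (x :: t) c = some (pvMaxF c x t) := by
  show List.foldl _ (some x) t = _
  unfold pvMaxF
  induction t generalizing x with
  | nil => rfl
  | cons y u ih =>
    simp only [List.foldl_cons]
    by_cases h : c x < c y <;> simp [h, ih]

theorem le_maxF {α : Type} (c : α → Int) (t : List α) (a : α) :
    c a ≤ c (pvMaxF c a t) := by
  unfold pvMaxF
  induction t generalizing a with
  | nil => simp
  | cons y u ih =>
    simp only [List.foldl_cons]
    by_cases h : c a < c y
    · simp only [if_pos h]; exact le_of_lt (lt_of_lt_of_le h (ih y))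
    · simp only [if_neg h]; exact ih a

-- the running max is the FIRST maximal element: everything before it is strictly smaller,
-- everything after it is at most it
theorem maxF_decomp {α : Type} (c : α → Int) :
    ∀ (t : List α) (a : α), ∃ t1 t2,
      a :: t = t1 ++ pvMaxF c a t :: t2
        ∧ (∀ z ∈ t1, c z < c (pvMaxF c a t))
        ∧ (∀ z ∈ t2, c z ≤ c (pvMaxF c a t)) := by
  intro t
  induction t with
  | nil => intro a; exact ⟨[], [], rfl, by simp, by simp⟩
  | cons y t' ih =>
    intro a
    by_cases h : c a < c y
    · have hM : pvMaxF c a (y :: t') = pvMaxF c y t' := by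
        simp only [pvMaxF, List.foldl_cons, if_pos h]
      obtain ⟨t1, t2, he, h1, h2⟩ := ih y
      rw [hM]
      refine ⟨a :: t1, t2, by rw [List.cons_append, ← he], ?_, h2⟩
      intro z hz
      rcases List.mem_cons.1 hz with rfl | hz
      · exact lt_of_lt_of_le h (le_maxF c t' y)
      · exact h1 z hz
    · have hM : pvMaxF c a (y :: t') = pvMaxF c a t' := by
        simp only [pvMaxF, List.foldl_cons, if_neg h]
      obtain ⟨t1, t2, he, h1, h2⟩ := ih a
      rw [hM]
      cases t1 with
      | nil =>
        simp only [List.nil_append, List.cons.injEq] at he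
        obtain ⟨ha, ht⟩ := he
        refine ⟨[], y :: t2, ?_, by simp, ?_⟩
        · rw [List.nil_append, ← ha, ht]
        · intro z hz
          rcases List.mem_cons.1 hz with rfl | hz
          · rw [← ha]; omega
          · exact h2 z hz
      | cons b r =>
        simp only [List.cons_append, List.cons.injEq] at he
        obtain ⟨hb, ht'⟩ := he
        refine ⟨a :: y :: r, t2, by rw [List.cons_append, List.cons_append, ← ht'], ?_, h2⟩
        have hlt_a : c a < c (pvMaxF c a t') := by
          have := h1 b (by simp)
          rwa [← hb] at this
        intro z hz
        rcases List.mem_cons.1 hz with rfl | hz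
        · exact hlt_a
        · rcases List.mem_cons.1 hz with rfl | hz
          · omega
          · exact h1 z (by simp [hz])

-- inserting below an at-least-as-large head keeps the head in place (stability of insertBy)
theorem foldl_insertBy_cons_max {α : Type} (c : α → Int) (h : α) :
    ∀ (l : List α) (acc : List α), (∀ y ∈ l, c y ≤ c h) →
      l.foldl (fun acc x => PySem.List.insertBy (fun a b => decide (c b < c a)) x acc) (h :: acc)
        = h :: l.foldl (fun acc x => PySem.List.insertBy (fun a b => decide (c b < c a)) x acc) acc := by
  intro l
  induction l with
  | nil => intro acc _; rfl
  | cons y t ih =>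
    intro acc hle
    have hy : ¬ c h < c y := by
      have := hle y (by simp); omega
    simp only [List.foldl_cons, PySem.List.insertBy, hy, decide_false]
    simp only [Bool.false_eq_true, if_false]
    exact ih _ (fun z hz => hle z (by simp [hz]))

theorem insertBy_cons_of_forall_lt {α : Type} (c : α → Int) (m : α) (acc : List α)
    (h : ∀ a ∈ acc, c a < c m) :
    PySem.List.insertBy (fun a b => decide (c b < c a)) m acc = m :: acc := by
  cases acc with
  | nil => rfl
  | cons a r =>
    have := h a (by simp)
    simp [PySem.List.insertBy, this]

-- head of the stable descending insertion sort: the first maximal element comes out first,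
-- the rest sorts the list with that element erased
theorem sorted_rev_head {α : Type} [BEq α] [LawfulBEq α] (c : α → Int) (x : α) (t : List α) :
    PySem.List.sorted (x :: t) c true
      = pvMaxF c x t :: PySem.List.sorted ((x :: t).erase (pvMaxF c x t)) c true := by
  obtain ⟨t1, t2, he, h1, h2⟩ := maxF_decomp c t x
  set M := pvMaxF c x t with hM
  have hnotmem : M ∉ t1 := by
    intro hmem
    have := h1 M hmem; omega
  have herase : (x :: t).erase M = t1 ++ t2 := by
    rw [he, List.erase_append_right _ (by simpa using hnotmem), List.erase_cons_head]
  rw [herase, he, PySem.List.sorted_rev_eq_foldl_insertBy, PySem.List.sorted_rev_eq_foldl_insertBy,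
    List.foldl_append, List.foldl_append, List.foldl_cons]
  set acc1 := t1.foldl (fun acc x => PySem.List.insertBy (fun a b => decide (c b < c a)) x acc) []
    with hacc1
  have hacc1mem : ∀ a ∈ acc1, c a < c M := by
    intro a ha
    have hperm : acc1.Perm t1 := by
      rw [hacc1, ← PySem.List.sorted_rev_eq_foldl_insertBy]
      exact PySem.List.sorted_perm t1 c true
    exact h1 a (hperm.mem_iff.1 ha)
  rw [insertBy_cons_of_forall_lt c M acc1 hacc1mem]
  exact foldl_insertBy_cons_max c M t2 acc1 h2

-- three-round first-max selection IS the 3-prefix of the stable descending sort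
theorem select_eq_take_sorted (succ : List String) :
    ∀ (n : Nat) (ks : List String),
      pvSelect n succ ks
        = (PySem.List.sorted ks (fun k => ((succ.count k : Nat) : Int)) true).take n := by
  intro n
  induction n with
  | zero => intro ks; simp [pvSelect]
  | succ n ih =>
    intro ks
    cases ks with
    | nil => simp [pvSelect, PySem.List.max?, PySem.List.sorted]
    | cons x t =>
      rw [pvSelect, max?_cons_eq_maxF,
        sorted_rev_head (fun k => ((succ.count k : Nat) : Int)) x t]
      simp only [List.take_succ_cons]
      rw [ih]

-- ===== VERDICT (by name: the statement is the Claim_ definition above) =====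
theorem predict_next_topic_spec : Claim_equal_predict_next_topic := by
  intro ct history _
  unfold Spec_predict_next_topic
  simp only [predict_next_topic, predict_next_topic_alt]
  rw [foldl_range_pairs [] (fun tr a b =>
        PySem.Dict.modify tr (pvIntent a) PySem.Dict.empty
          (fun c => PySem.Dict.modify c (pvIntent b) 0 (· + 1)))]
  set pairs := history.zip history.tail with hpairs
  set succ := (pairs.filter (fun p => pvIntent p.1 == ct)).map (fun p => pvIntent p.2) with hsucc
  have hS := getD_nested_fold ct pairs PySem.Dict.empty
  have he : (PySem.Dict.empty : PySem.Dict String (PySem.Dict String Int)).getD ct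
      PySem.Dict.empty = PySem.Dict.empty := rfl
  rw [he] at hS
  -- the selected counter is the counter of the successor list succ
  have hcounter : (pairs.foldl
      (fun c p => if pvIntent p.1 == ct then c.modify (pvIntent p.2) 0 (· + 1) else c)
      PySem.Dict.empty) = PySem.Dict.counter succ := by
    rw [PySem.List.foldl_if_eq_foldl_filter, PySem.Dict.counter_eq_foldl, hsucc, List.foldl_map]
  rw [hcounter] at hS
  split_ifs with hc
  · -- current_topic ∈ transitions: A's pvTop3 of the counter = B's selection
    rw [hS]
    unfold pvTop3
    rw [PySem.Dict.items_counter, sorted_map_comm (fun k => (k, ((succ.count k : Nat) : Int)))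
        (fun kv => kv.2), ← List.map_take, List.map_map]
    simp only [Function.comp_def, List.map_id_fun', id_eq]
    rw [select_eq_take_sorted succ 3 (PySem.List.dedup succ), PySem.List.dedup_eq_ofList]
  · -- current_topic ∉ transitions: the counter is empty, so succ has no distinct keys and B selects nothing
    have hemp : PySem.Dict.counter succ = PySem.Dict.empty := by
      rw [← hS]
      exact PySem.Dict.getD_of_not_contains _ _ (by simpa using hc)
    have hkeys : PySem.Set.ofList succ = [] := by
      have := PySem.Dict.keys_counter succ
      rw [hemp] at this
      simpa [PySem.Dict.keys_empty] using this.symm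
    rw [PySem.List.dedup_eq_ofList, hkeys]
    rfl
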